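-- pv_equiv track=rewrite | github.com/rupakc/Kaggle-Compendium | TalkingData AdTracking Fraud Detection/track_baseline.py | parse_date_custom
-- ===== SOURCE A (Python) =====
-- def parse_date_custom(date_list,date_separator='-',time_separator=':',space_separator=' '):
--     year_list = list([])
--     month_list = list([])
--     day_list = list([])
--     hour_list = list([])
--     minute_list = list([])
--     second_list = list([])
--     for date_string in date_list:
--         separated_date_list = str(date_string).split(space_separator)
--         date_part = separated_date_list[0]
--         time_part = separated_date_list[1]
--         date_split = date_part.split(date_separator)
--         time_split = time_part.split(time_separator)
--         year_list.append(date_split[0])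
--         month_list.append(date_split[1])
--         day_list.append(date_split[2])
--         hour_list.append(time_split[0])
--         minute_list.append(time_split[1])
--         second_list.append(time_split[2])
--     return year_list,month_list,day_list,hour_list,minute_list,second_list
-- ===== SOURCE B (Python) =====
-- def parse_date_custom(date_list, date_separator='-', time_separator=':', space_separator=' '):
--     rows = []
--     for date_string in date_list:
--         parts = str(date_string).split(space_separator)
--         d = parts[0].split(date_separator)
--         t = parts[1].split(time_separator)
--         rows.append((d[0], d[1], d[2], t[0], t[1], t[2]))
--     if not rows:
--         return [], [], [], [], [], []
--     year, month, day, hour, minute, second = (list(col) for col in zip(*rows))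
--     return year, month, day, hour, minute, second
-- ===== Notes on version B (the rewrite author's own statement) =====
-- stated objective: alternative
-- what changed: B builds one 6-field row per string and transposes the row list with zip(*rows) at the end (empty input special-cased), instead of A's six parallel accumulator lists appended to inside the loop.
import Mathlib
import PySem

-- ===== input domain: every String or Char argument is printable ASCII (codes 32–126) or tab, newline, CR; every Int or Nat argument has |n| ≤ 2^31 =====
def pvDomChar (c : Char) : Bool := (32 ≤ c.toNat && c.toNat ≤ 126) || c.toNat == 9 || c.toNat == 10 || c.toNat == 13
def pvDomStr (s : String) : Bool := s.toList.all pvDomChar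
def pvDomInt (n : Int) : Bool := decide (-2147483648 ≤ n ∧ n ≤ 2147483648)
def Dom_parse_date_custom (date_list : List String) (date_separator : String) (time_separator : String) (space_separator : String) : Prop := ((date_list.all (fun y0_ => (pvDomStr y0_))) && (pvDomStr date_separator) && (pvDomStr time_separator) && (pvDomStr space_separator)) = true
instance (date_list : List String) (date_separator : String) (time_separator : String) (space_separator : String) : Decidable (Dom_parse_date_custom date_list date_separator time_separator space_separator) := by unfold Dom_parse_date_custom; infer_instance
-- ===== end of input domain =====

-- B replaces A's six parallel accumulator lists by one row per string plus a final transpose (objective: alternative decomposition).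

-- ===== PORT A =====
-- six accumulator lists, one append to each per date string (getD "" / getD [] only fire where Python A raises, which Pre_ excludes)
def parse_date_custom (date_list : List String) (date_separator : String) (time_separator : String) (space_separator : String) : List String × List String × List String × List String × List String × List String :=
  date_list.foldl (fun acc date_string =>
    let separated_date_list := (PySem.Str.split? date_string space_separator).getD []
    let date_part := (PySem.List.pyGet? separated_date_list 0).getD ""
    let time_part := (PySem.List.pyGet? separated_date_list 1).getD ""
    let date_split := (PySem.Str.split? date_part date_separator).getD []
    let time_split := (PySem.Str.split? time_part time_separator).getD []
    (acc.1 ++ [(PySem.List.pyGet? date_split 0).getD ""],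
     acc.2.1 ++ [(PySem.List.pyGet? date_split 1).getD ""],
     acc.2.2.1 ++ [(PySem.List.pyGet? date_split 2).getD ""],
     acc.2.2.2.1 ++ [(PySem.List.pyGet? time_split 0).getD ""],
     acc.2.2.2.2.1 ++ [(PySem.List.pyGet? time_split 1).getD ""],
     acc.2.2.2.2.2 ++ [(PySem.List.pyGet? time_split 2).getD ""]))
    ([], [], [], [], [], [])

-- ===== PORT B =====
-- one 6-field row per date string
def pvRowB (date_string : String) (date_separator : String) (time_separator : String) (space_separator : String) : String × String × String × String × String × String :=
  let parts := (PySem.Str.split? date_string space_separator).getD []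
  let d := (PySem.Str.split? ((PySem.List.pyGet? parts 0).getD "") date_separator).getD []
  let t := (PySem.Str.split? ((PySem.List.pyGet? parts 1).getD "") time_separator).getD []
  ((PySem.List.pyGet? d 0).getD "", (PySem.List.pyGet? d 1).getD "", (PySem.List.pyGet? d 2).getD "",
   (PySem.List.pyGet? t 0).getD "", (PySem.List.pyGet? t 1).getD "", (PySem.List.pyGet? t 2).getD "")

def parse_date_custom_alt (date_list : List String) (date_separator : String) (time_separator : String) (space_separator : String) : List String × List String × List String × List String × List String × List String :=
  let rows := date_list.map (fun s => pvRowB s date_separator time_separator space_separator)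
  match rows with
  | [] => ([], [], [], [], [], [])
  | _ => -- zip(*rows): the six columns of the row list
    (rows.map (·.1), rows.map (·.2.1), rows.map (·.2.2.1),
     rows.map (·.2.2.2.1), rows.map (·.2.2.2.2.1), rows.map (·.2.2.2.2.2))

-- ===== PRECONDITION & SPEC =====
-- Pre_ excludes exactly the inputs where Python A raises: an empty separator used on some element
-- (ValueError) or an element whose space-split has < 2 parts / whose date or time part splits into
-- < 3 fields (IndexError).
def Pre_parse_date_custom (date_list : List String) (date_separator : String) (time_separator : String) (space_separator : String) : Prop :=
  ∀ s ∈ date_list,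
    space_separator ≠ "" ∧ date_separator ≠ "" ∧ time_separator ≠ "" ∧
    2 ≤ ((PySem.Str.split? s space_separator).getD []).length ∧
    3 ≤ ((PySem.Str.split? ((PySem.List.pyGet? ((PySem.Str.split? s space_separator).getD []) 0).getD "") date_separator).getD []).length ∧
    3 ≤ ((PySem.Str.split? ((PySem.List.pyGet? ((PySem.Str.split? s space_separator).getD []) 1).getD "") time_separator).getD []).length
instance (date_list : List String) (date_separator : String) (time_separator : String) (space_separator : String) : Decidable (Pre_parse_date_custom date_list date_separator time_separator space_separator) := by unfold Pre_parse_date_custom; infer_instance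

def pvWitness_parse_date_custom : List String × String × String × String := (["2017-11-06 14:32:21", "1-2-3 4:5:6"], "-", ":", " ")

def Spec_parse_date_custom (date_list : List String) (date_separator : String) (time_separator : String) (space_separator : String) (out : List String × List String × List String × List String × List String × List String) : Prop := out = parse_date_custom_alt date_list date_separator time_separator space_separator
instance (date_list : List String) (date_separator : String) (time_separator : String) (space_separator : String) (out : List String × List String × List String × List String × List String × List String) : Decidable (Spec_parse_date_custom date_list date_separator time_separator space_separator out) := by unfold Spec_parse_date_custom; infer_instance

-- ===== CLAIM (what is proved, stated in full; the proofs are below) =====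
def Claim_equal_parse_date_custom : Prop := ∀ (date_list : List String) (date_separator : String) (time_separator : String) (space_separator : String), Dom_parse_date_custom date_list date_separator time_separator space_separator → Pre_parse_date_custom date_list date_separator time_separator space_separator → Spec_parse_date_custom date_list date_separator time_separator space_separator (parse_date_custom date_list date_separator time_separator space_separator)

-- ===== LEMMAS AND PROOFS =====

-- A's fold over six accumulators is the six columns of the row map, appended to the accumulators.
theorem pv_foldA_eq (dl : List String) (dsep tsep ssep : String)
    (acc : List String × List String × List String × List String × List String × List String) :
    dl.foldl (fun acc date_string =>
      let separated_date_list := (PySem.Str.split? date_string ssep).getD []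
      let date_part := (PySem.List.pyGet? separated_date_list 0).getD ""
      let time_part := (PySem.List.pyGet? separated_date_list 1).getD ""
      let date_split := (PySem.Str.split? date_part dsep).getD []
      let time_split := (PySem.Str.split? time_part tsep).getD []
      (acc.1 ++ [(PySem.List.pyGet? date_split 0).getD ""],
       acc.2.1 ++ [(PySem.List.pyGet? date_split 1).getD ""],
       acc.2.2.1 ++ [(PySem.List.pyGet? date_split 2).getD ""],
       acc.2.2.2.1 ++ [(PySem.List.pyGet? time_split 0).getD ""],
       acc.2.2.2.2.1 ++ [(PySem.List.pyGet? time_split 1).getD ""],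
       acc.2.2.2.2.2 ++ [(PySem.List.pyGet? time_split 2).getD ""])) acc
    = (acc.1 ++ dl.map (fun s => (pvRowB s dsep tsep ssep).1),
       acc.2.1 ++ dl.map (fun s => (pvRowB s dsep tsep ssep).2.1),
       acc.2.2.1 ++ dl.map (fun s => (pvRowB s dsep tsep ssep).2.2.1),
       acc.2.2.2.1 ++ dl.map (fun s => (pvRowB s dsep tsep ssep).2.2.2.1),
       acc.2.2.2.2.1 ++ dl.map (fun s => (pvRowB s dsep tsep ssep).2.2.2.2.1),
       acc.2.2.2.2.2 ++ dl.map (fun s => (pvRowB s dsep tsep ssep).2.2.2.2.2)) := by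
  induction dl generalizing acc with
  | nil => simp
  | cons h t ih =>
    simp only [List.foldl_cons, List.map_cons, ih, pvRowB]
    simp

-- ===== VERDICT (by name: the statement is the Claim_ definition above) =====
theorem parse_date_custom_spec : Claim_equal_parse_date_custom := by
  intro dl dsep tsep ssep _ _
  unfold Spec_parse_date_custom parse_date_custom parse_date_custom_alt
  rw [pv_foldA_eq]
  cases dl with
  | nil => simp
  | cons h t => simp [List.map_map]
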